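-- pv_equiv track=rewrite | github.com/VeronicaToro/LoRa-model | set_covers.py | RemoveRedundant
-- ===== SOURCE A (Python) =====
-- def RemoveRedundant(C):
--     _C1 = C.copy()
--     for s in _C1:
--         covered = set()
--         for node in set(C)-{s}:
--             covered = covered | C[node]
--         if all(element in covered for element in _C1[s]):
--             del C[s]
--     return C
-- ===== SOURCE B (Python) =====
-- def RemoveRedundant(C):
--     counts = {}
--     for v in C.values():
--         for e in v:
--             counts[e] = counts.get(e, 0) + 1
--     for s, v in list(C.items()):
--         if all(counts.get(e, 0) >= 2 for e in v):
--             for e in v: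
--                 counts[e] -= 1
--             del C[s]
--     return C
-- ===== Notes on version B (the rewrite author's own statement) =====
-- stated objective: faster
-- what changed: Instead of rebuilding, for every key, the union of all other remaining sets (O(n^2*m)), B builds one coverage counter per element up front and deletes a set when every element has count >= 2, decrementing the counts of a deleted set (O(n*m)).
import Mathlib
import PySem

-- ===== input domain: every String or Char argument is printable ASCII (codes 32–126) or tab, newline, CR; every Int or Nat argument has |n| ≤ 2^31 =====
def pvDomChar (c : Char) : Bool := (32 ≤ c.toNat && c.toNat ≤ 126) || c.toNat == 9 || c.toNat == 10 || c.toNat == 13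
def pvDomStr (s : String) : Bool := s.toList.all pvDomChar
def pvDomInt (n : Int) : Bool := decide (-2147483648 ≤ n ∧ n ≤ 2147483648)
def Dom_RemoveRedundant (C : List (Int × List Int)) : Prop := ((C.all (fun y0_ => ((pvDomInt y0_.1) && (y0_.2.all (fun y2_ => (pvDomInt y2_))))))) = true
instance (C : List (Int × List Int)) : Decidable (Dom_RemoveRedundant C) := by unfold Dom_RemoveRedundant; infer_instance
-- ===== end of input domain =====

-- B replaces A's per-key rebuild of the union of all other sets (O(n^2·m)) by one coverage
-- counter maintained across deletions (O(n·m)). Both A and B delete the same keys from the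
-- caller's dict in place; the theorems are about the returned dict value.

-- ===== PORT A =====
-- one iteration of A's 'for s in _C1' loop: s is a key, d the current dict C, C1 the copy _C1
def pvStepA (C1 : PySem.Dict Int (List Int)) (d : PySem.Dict Int (List Int)) (s : Int) :
    PySem.Dict Int (List Int) :=
  let covered : PySem.Set Int :=
    (PySem.Set.diff (PySem.Set.ofList d.keys) (PySem.Set.ofList [s])).foldl
      (fun covered node => PySem.Set.union covered (d.getD node [])) PySem.Set.empty
  if (C1.getD s []).all (fun element => PySem.Set.contains covered element) then d.erase s else d

def RemoveRedundant (C : List (Int × List Int)) : List (Int × List Int) :=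
  let _C1 : PySem.Dict Int (List Int) := PySem.Dict.mk C
  (_C1.keys.foldl (pvStepA _C1) (PySem.Dict.mk C)).items

-- ===== PORT B =====
-- counts[e] = number of sets of C containing e (Source B's first loop)
def pvCounts (C : List (Int × List Int)) : PySem.Dict Int Int :=
  C.foldl (fun counts v => v.2.foldl (fun counts e => counts.insert e (counts.getD e 0 + 1)) counts)
    PySem.Dict.empty

-- one iteration of Source B's 'for s, v in list(C.items())' loop: state = (current dict, counts)
def pvStepB (st : PySem.Dict Int (List Int) × PySem.Dict Int Int) (sv : Int × List Int) :
    PySem.Dict Int (List Int) × PySem.Dict Int Int :=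
  if sv.2.all (fun e => decide (2 ≤ st.2.getD e 0)) then
    (st.1.erase sv.1, sv.2.foldl (fun counts e => counts.insert e (counts.getD e 0 - 1)) st.2)
  else st

def RemoveRedundant_alt (C : List (Int × List Int)) : List (Int × List Int) :=
  (C.foldl pvStepB (PySem.Dict.mk C, pvCounts C)).1.items

-- ===== PRECONDITION & SPEC =====
-- Pre_ is the representation invariant of the Python argument dict[int, set[int]]:
-- distinct keys and duplicate-free value lists (a Python dict of sets can be nothing else).
def Pre_RemoveRedundant (C : List (Int × List Int)) : Prop :=
  (C.map Prod.fst).Nodup ∧ ∀ p ∈ C, p.2.Nodup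
instance (C : List (Int × List Int)) : Decidable (Pre_RemoveRedundant C) := by
  unfold Pre_RemoveRedundant; infer_instance

def pvWitness_RemoveRedundant : (List (Int × List Int)) := [(1, [7, 8]), (2, [8]), (3, [7])]

def Spec_RemoveRedundant (C : List (Int × List Int)) (out : List (Int × List Int)) : Prop := out = RemoveRedundant_alt C
instance (C : List (Int × List Int)) (out : List (Int × List Int)) : Decidable (Spec_RemoveRedundant C out) := by unfold Spec_RemoveRedundant; infer_instance

-- ===== CLAIM (what is proved, stated in full; the proofs are below) =====
def Claim_equal_RemoveRedundant : Prop := ∀ (C : List (Int × List Int)), Dom_RemoveRedundant C → Pre_RemoveRedundant C → Spec_RemoveRedundant C (RemoveRedundant C)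

-- ===== LEMMAS AND PROOFS =====

-- membership in A's 'covered' accumulator
lemma pv_mem_foldl_union {α β : Type} [BEq α] [LawfulBEq α] (l : List β) (f : β → List α)
    (s0 : PySem.Set α) (y : α) :
    y ∈ l.foldl (fun s b => PySem.Set.union s (f b)) s0 ↔ y ∈ s0 ∨ ∃ b ∈ l, y ∈ f b := by
  induction l generalizing s0 with
  | nil => simp
  | cons x xs ih =>
    rw [List.foldl_cons, ih]
    simp only [PySem.Set.union, PySem.Set.mem_update, List.mem_cons]
    constructor
    · rintro ((h | h) | ⟨b, hb, hy⟩)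
      · exact Or.inl h
      · exact Or.inr ⟨x, Or.inl rfl, h⟩
      · exact Or.inr ⟨b, Or.inr hb, hy⟩
    · rintro (h | ⟨b, (rfl | hb), hy⟩)
      · exact Or.inl (Or.inl h)
      · exact Or.inl (Or.inr hy)
      · exact Or.inr ⟨b, hb, hy⟩

-- Source B's first loop counts, in closed form
lemma pv_counts_aux (l : List (Int × List Int)) (d : PySem.Dict Int Int) (e : Int) :
    (l.foldl (fun c v => v.2.foldl (fun c x => c.insert x (c.getD x 0 + 1)) c) d).getD e 0
      = d.getD e 0 + (l.map (fun p => (p.2.count e : Int))).sum := by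
  induction l generalizing d with
  | nil => simp
  | cons p ps ih =>
    simp only [List.foldl_cons, ih, PySem.Dict.getD_foldl_insert_add_one, List.map_cons,
      List.sum_cons]
    ring

-- Source B's decrement loop, in closed form
lemma pv_dec_aux (l : List Int) (d : PySem.Dict Int Int) (e : Int) :
    (l.foldl (fun c x => c.insert x (c.getD x 0 - 1)) d).getD e 0 = d.getD e 0 - (l.count e : Int) := by
  induction l generalizing d with
  | nil => simp
  | cons x xs ih =>
    by_cases h : x = e
    · subst h
      simp [ih, PySem.Dict.getD_insert_self, List.count_cons_self]
      ring
    · have hne : e ≠ x := fun he => h he.symm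
      simp [ih, PySem.Dict.getD_insert, hne, h]

-- the coverage sum of the current dict
def pvSum (items : List (Int × List Int)) (e : Int) : Int :=
  (items.map (fun p => (p.2.count e : Int))).sum

lemma pv_sum_append (l1 l2 : List (Int × List Int)) (e : Int) :
    pvSum (l1 ++ l2) e = pvSum l1 e + pvSum l2 e := by
  simp [pvSum]

lemma pv_sum_nonneg (l : List (Int × List Int)) (e : Int) : 0 ≤ pvSum l e := by
  induction l with
  | nil => simp [pvSum]
  | cons p ps ih => simpa [pvSum, List.map_cons, List.sum_cons] using by positivity

lemma pv_sum_pos_iff (l : List (Int × List Int)) (e : Int) :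
    0 < pvSum l e ↔ ∃ p ∈ l, e ∈ p.2 := by
  induction l with
  | nil => simp [pvSum]
  | cons p ps ih =>
    have h0 := pv_sum_nonneg ps e
    have hc : (0 : Int) ≤ (p.2.count e : Int) := by positivity
    constructor
    · intro h
      simp only [pvSum, List.map_cons, List.sum_cons] at h
      by_cases hm : e ∈ p.2
      · exact ⟨p, by simp, hm⟩
      · have : (p.2.count e : Int) = 0 := by
          simp [List.count_eq_zero_of_not_mem hm]
        obtain ⟨q, hq, hqe⟩ := ih.mp (by simpa [pvSum, this] using h)
        exact ⟨q, by simp [hq], hqe⟩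
    · rintro ⟨q, hq, hqe⟩
      rcases List.mem_cons.mp hq with h | h
      · subst h
        have : 0 < (q.2.count e : Int) := by
          exact_mod_cast Nat.cast_pos.mpr (List.count_pos_iff.mpr hqe)
        simp only [pvSum, List.map_cons, List.sum_cons]
        have := pv_sum_nonneg ps e
        simp [pvSum] at this ⊢
        omega
      · have := ih.mpr ⟨q, h, hqe⟩
        simp only [pvSum, List.map_cons, List.sum_cons] at *
        omega

-- A's 'covered' set membership, in terms of the current dict's items
lemma pv_covered_iff (d : PySem.Dict Int (List Int)) (hkeys : d.keys.Nodup) (s e : Int) :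
    PySem.Set.contains
        ((PySem.Set.diff (PySem.Set.ofList d.keys) (PySem.Set.ofList [s])).foldl
          (fun covered node => PySem.Set.union covered (d.getD node [])) PySem.Set.empty) e = true
      ↔ ∃ p ∈ d.items, p.1 ≠ s ∧ e ∈ p.2 := by
  rw [PySem.Set.contains_iff, pv_mem_foldl_union]
  constructor
  · rintro (h | ⟨node, hnode, he⟩)
    · simp [PySem.Set.empty] at h
    · rw [PySem.Set.mem_diff, PySem.Set.mem_ofList, PySem.Set.mem_ofList] at hnode
      obtain ⟨hkmem, hne⟩ := hnode
      simp only [List.mem_singleton] at hne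
      simp only [PySem.Dict.keys, List.mem_map] at hkmem
      obtain ⟨p, hp, rfl⟩ := hkmem
      have hval : d.getD p.1 [] = p.2 :=
        PySem.Dict.getD_of_mem_items d (show (p.1, p.2) ∈ d.items by simpa using hp) hkeys []
      exact ⟨p, hp, hne, hval ▸ he⟩
  · rintro ⟨p, hp, hne, he⟩
    refine Or.inr ⟨p.1, ?_, ?_⟩
    · rw [PySem.Set.mem_diff, PySem.Set.mem_ofList, PySem.Set.mem_ofList]
      exact ⟨by simp only [PySem.Dict.keys, List.mem_map]; exact ⟨p, hp, rfl⟩, by simpa using hne⟩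
    · rw [PySem.Dict.getD_of_mem_items d (show (p.1, p.2) ∈ d.items by simpa using hp) hkeys []]
      exact he

lemma pv_sum_cons (p : Int × List Int) (l : List (Int × List Int)) (e : Int) :
    pvSum (p :: l) e = (p.2.count e : Int) + pvSum l e := by
  simp [pvSum]

-- 'count ≥ 2' says exactly 'some OTHER set of the dict contains e'
lemma pv_two_le_iff (l1 l2 : List (Int × List Int)) (s : Int) (v : List Int) (hv : v.Nodup)
    (h1 : ∀ p ∈ l1, p.1 ≠ s) (h2 : ∀ p ∈ l2, p.1 ≠ s) (e : Int) (he : e ∈ v) :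
    2 ≤ pvSum (l1 ++ (s, v) :: l2) e ↔ ∃ p ∈ l1 ++ (s, v) :: l2, p.1 ≠ s ∧ e ∈ p.2 := by
  have hsplit : pvSum (l1 ++ (s, v) :: l2) e = pvSum l1 e + 1 + pvSum l2 e := by
    rw [pv_sum_append, pv_sum_cons]
    simp [List.count_eq_one_of_mem hv he]
    ring
  rw [hsplit]
  have n1 := pv_sum_nonneg l1 e
  have n2 := pv_sum_nonneg l2 e
  constructor
  · intro h
    have hor : 0 < pvSum l1 e ∨ 0 < pvSum l2 e := by omega
    rcases hor with h' | h'
    · obtain ⟨p, hp, hpe⟩ := (pv_sum_pos_iff l1 e).mp h'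
      exact ⟨p, by simp [hp], h1 p hp, hpe⟩
    · obtain ⟨p, hp, hpe⟩ := (pv_sum_pos_iff l2 e).mp h'
      exact ⟨p, by simp [hp], h2 p hp, hpe⟩
  · rintro ⟨p, hp, hps, hpe⟩
    rcases List.mem_append.mp hp with h' | h'
    · have := (pv_sum_pos_iff l1 e).mpr ⟨p, h', hpe⟩
      omega
    · rcases List.mem_cons.mp h' with rfl | h''
      · exact absurd rfl hps
      · have := (pv_sum_pos_iff l2 e).mpr ⟨p, h'', hpe⟩
        omega

-- deleting key s removes exactly the pair (s, v) from the items
lemma pv_erase_items (d : PySem.Dict Int (List Int)) (s : Int) (v : List Int)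
    (l1 l2 : List (Int × List Int)) (hitems : d.items = l1 ++ (s, v) :: l2)
    (h1 : ∀ p ∈ l1, p.1 ≠ s) (h2 : ∀ p ∈ l2, p.1 ≠ s) :
    (d.erase s).items = l1 ++ l2 := by
  have h1' : l1.filter (fun p => !p.1 == s) = l1 :=
    List.filter_eq_self.mpr (fun p hp => by simpa using h1 p hp)
  have h2' : l2.filter (fun p => !p.1 == s) = l2 :=
    List.filter_eq_self.mpr (fun p hp => by simpa using h2 p hp)
  simp [PySem.Dict.erase, hitems, List.filter_append, h1', h2']

-- the loop invariant: A's dict fold and B's (dict, counts) fold stay in lockstep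
lemma pv_loop_eq (rest : List (Int × List Int)) (C1 : PySem.Dict Int (List Int))
    (d : PySem.Dict Int (List Int)) (counts : PySem.Dict Int Int)
    (hkeys : d.keys.Nodup)
    (hvals : ∀ p ∈ d.items, p.2.Nodup)
    (hrest : ∀ p ∈ rest, p ∈ d.items)
    (hrestnd : (rest.map Prod.fst).Nodup)
    (hC1 : ∀ p ∈ rest, C1.getD p.1 [] = p.2)
    (hcnt : ∀ e, counts.getD e 0 = pvSum d.items e) :
    (rest.map Prod.fst).foldl (pvStepA C1) d = (rest.foldl pvStepB (d, counts)).1 := by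
  induction rest generalizing d counts with
  | nil => simp
  | cons sv rest' ih =>
    obtain ⟨s, v⟩ := sv
    have hmem : (s, v) ∈ d.items := hrest _ (by simp)
    obtain ⟨l1, l2, hitems⟩ := List.append_of_mem hmem
    have hnd : ((l1.map Prod.fst) ++ s :: (l2.map Prod.fst)).Nodup := by
      have := hkeys
      simp only [PySem.Dict.keys, hitems, List.map_append, List.map_cons] at this
      exact this
    have h1 : ∀ p ∈ l1, p.1 ≠ s := by
      intro p hp hps
      have hpm : s ∈ l1.map Prod.fst := List.mem_map.mpr ⟨p, hp, hps⟩
      exact (List.nodup_append.mp hnd).2.2 s hpm s (by simp) rfl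
    have h2 : ∀ p ∈ l2, p.1 ≠ s := by
      intro p hp hps
      have hnd2 := (List.nodup_append.mp hnd).2.1
      exact (List.nodup_cons.mp hnd2).1 (List.mem_map.mpr ⟨p, hp, hps⟩)
    have hv : v.Nodup := hvals _ hmem
    have hsnotrest : ∀ p ∈ rest', p.1 ≠ s := by
      intro p hp hps
      have := hrestnd
      simp only [List.map_cons, List.nodup_cons] at this
      exact this.1 (List.mem_map.mpr ⟨p, hp, hps⟩)
    have hcond :
        ((C1.getD s []).all fun element =>
            PySem.Set.contains
              ((PySem.Set.diff (PySem.Set.ofList d.keys) (PySem.Set.ofList [s])).foldl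
                (fun covered node => PySem.Set.union covered (d.getD node [])) PySem.Set.empty)
              element)
          = (v.all fun e => decide (2 ≤ counts.getD e 0)) := by
      rw [hC1 (s, v) (by simp)]
      rw [Bool.eq_iff_iff, List.all_eq_true, List.all_eq_true]
      constructor
      · intro h e he
        have := (pv_covered_iff d hkeys s e).mp (h e he)
        rw [hitems] at this
        simp only [decide_eq_true_eq]
        rw [hcnt e, hitems]
        exact (pv_two_le_iff l1 l2 s v hv h1 h2 e he).mpr this
      · intro h e he
        have h' := h e he
        simp only [decide_eq_true_eq] at h'
        rw [hcnt e, hitems] at h'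
        have := (pv_two_le_iff l1 l2 s v hv h1 h2 e he).mp h'
        rw [pv_covered_iff d hkeys s e, hitems]
        exact this
    have hvmem : ∀ p ∈ l1 ++ l2, p ∈ d.items := by
      intro p hp
      rw [hitems]
      rcases List.mem_append.mp hp with h' | h'
      · exact List.mem_append.mpr (Or.inl h')
      · exact List.mem_append.mpr (Or.inr (List.mem_cons_of_mem _ h'))
    simp only [List.map_cons, List.foldl_cons]
    by_cases hb : (v.all fun e => decide (2 ≤ counts.getD e 0)) = true
    · have hA : pvStepA C1 d s = d.erase s := by
        simp only [pvStepA]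
        rw [hcond, if_pos hb]
      have hB : pvStepB (d, counts) (s, v) =
          (d.erase s, v.foldl (fun counts e => counts.insert e (counts.getD e 0 - 1)) counts) := by
        simp only [pvStepB]
        rw [if_pos hb]
      rw [hA, hB]
      have hitems' : (d.erase s).items = l1 ++ l2 := pv_erase_items d s v l1 l2 hitems h1 h2
      have hsub : (l1 ++ l2).Sublist (l1 ++ (s, v) :: l2) :=
        List.Sublist.append_left (List.sublist_cons_self _ _) _
      refine ih (d.erase s) _ ?_ ?_ ?_ ?_ ?_ ?_
      · have : (d.erase s).keys = (l1 ++ l2).map Prod.fst := by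
          simp [PySem.Dict.keys, hitems']
        rw [this]
        refine List.Nodup.sublist (hsub.map Prod.fst) ?_
        have := hkeys
        simpa only [PySem.Dict.keys, hitems] using this
      · intro p hp
        rw [hitems'] at hp
        exact hvals p (hvmem p hp)
      · intro p hp
        rw [hitems']
        have hpmem := hrest p (List.mem_cons_of_mem _ hp)
        rw [hitems] at hpmem
        rcases List.mem_append.mp hpmem with h' | h'
        · exact List.mem_append.mpr (Or.inl h')
        · rcases List.mem_cons.mp h' with heq | h''
          · exact absurd (by rw [heq]) (hsnotrest p hp)
          · exact List.mem_append.mpr (Or.inr h'')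
      · have := hrestnd
        simp only [List.map_cons, List.nodup_cons] at this
        exact this.2
      · intro p hp
        exact hC1 p (List.mem_cons_of_mem _ hp)
      · intro e
        rw [pv_dec_aux, hcnt e, hitems, hitems', pv_sum_append, pv_sum_cons, pv_sum_append]
        ring
    · have hA : pvStepA C1 d s = d := by
        simp only [pvStepA]
        rw [hcond, if_neg hb]
      have hB : pvStepB (d, counts) (s, v) = (d, counts) := by
        simp only [pvStepB]
        rw [if_neg hb]
      rw [hA, hB]
      refine ih d counts hkeys hvals ?_ ?_ ?_ hcnt
      · intro p hp
        exact hrest p (List.mem_cons_of_mem _ hp)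
      · have := hrestnd
        simp only [List.map_cons, List.nodup_cons] at this
        exact this.2
      · intro p hp
        exact hC1 p (List.mem_cons_of_mem _ hp)

-- ===== VERDICT (by name: the statement is the Claim_ definition above) =====
theorem RemoveRedundant_spec : Claim_equal_RemoveRedundant := by
  intro C _ hpre
  obtain ⟨hk, hv⟩ := hpre
  unfold Spec_RemoveRedundant RemoveRedundant RemoveRedundant_alt
  have hkeys : (PySem.Dict.mk C).keys.Nodup := by
    simpa [PySem.Dict.keys] using hk
  have hC1init : ∀ p ∈ C, (PySem.Dict.mk C).getD p.1 [] = p.2 := by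
    intro p hp
    exact PySem.Dict.getD_of_mem_items _ (show (p.1, p.2) ∈ C by simpa using hp) hkeys []
  have hcntinit : ∀ e, (pvCounts C).getD e 0 = pvSum C e := by
    intro e
    unfold pvCounts
    rw [pv_counts_aux]
    simp [pvSum, PySem.Dict.getD_empty]
  have hmain := pv_loop_eq C (PySem.Dict.mk C) (PySem.Dict.mk C) (pvCounts C) hkeys
    (fun p hp => hv p hp) (fun p hp => hp) hk hC1init hcntinit
  have hkeysC : (PySem.Dict.mk C).keys = C.map Prod.fst := by
    simp [PySem.Dict.keys]
  simp only [hkeysC] at *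
  exact congrArg PySem.Dict.items hmain
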